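-- pv_equiv track=rewrite | github.com/Isfireomat/Math_work | chart_defs.py | get_deviation_dict
-- ===== SOURCE A (Python) =====
-- def get_deviation_dict(masiv,normal):
--     d={"less":0,"more":0,"deviation":0,"deviation_2":0}
--     for i in masiv:
--         if i>normal:
--             d["more"]+=1
--             d["deviation"]+=i-normal
--         elif i<normal:
--             d["less"]+=1
--             d["deviation"]+=i-normal
--     return d
-- ===== SOURCE B (Python) =====
-- def _bisect_left(s, x, lo, hi):
--     while lo < hi:
--         mid = (lo + hi) // 2
--         if s[mid] < x:
--             lo = mid + 1
--         else:
--             hi = mid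
--     return lo
--
--
-- def _bisect_right(s, x, lo, hi):
--     while lo < hi:
--         mid = (lo + hi) // 2
--         if s[mid] <= x:
--             lo = mid + 1
--         else:
--             hi = mid
--     return lo
--
--
-- def get_deviation_dict(masiv, normal):
--     s = sorted(masiv)
--     n = len(s)
--     left = _bisect_left(s, normal, 0, n)
--     right = _bisect_right(s, normal, 0, n)
--     return {"less": left, "more": n - right,
--             "deviation": sum(masiv) - n * normal, "deviation_2": 0}
-- ===== Notes on version B (the rewrite author's own statement) =====
-- stated objective: alternative
-- what changed: Replaces A's single fused scan over a mutable dict with a sort followed by two binary searches (hand-written bisect_left/bisect_right) for the below/above counts, and a closed form sum(masiv) - n*normal for the total deviation (elements equal to normal contribute 0).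
import Mathlib
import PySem

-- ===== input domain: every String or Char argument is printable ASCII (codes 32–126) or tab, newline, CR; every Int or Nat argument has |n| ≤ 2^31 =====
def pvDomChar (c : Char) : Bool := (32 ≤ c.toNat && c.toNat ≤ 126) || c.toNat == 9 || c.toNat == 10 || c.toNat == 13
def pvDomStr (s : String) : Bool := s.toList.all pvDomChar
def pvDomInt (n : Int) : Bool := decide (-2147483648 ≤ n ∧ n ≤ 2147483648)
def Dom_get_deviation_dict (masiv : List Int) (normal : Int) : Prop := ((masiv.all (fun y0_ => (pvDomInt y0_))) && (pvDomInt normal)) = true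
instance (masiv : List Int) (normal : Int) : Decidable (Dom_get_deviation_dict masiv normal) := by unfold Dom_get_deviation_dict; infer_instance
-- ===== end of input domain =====

-- B sorts the list and finds the below/above counts by two hand-written binary
-- searches, with the total deviation as the closed form sum(masiv) - n*normal;
-- objective: alternative algorithm (not faster).


-- ===== PORT A =====
-- A's loop body: update the dict d for one element i.
def pvStepA (normal : Int) (d : PySem.Dict String Int) (i : Int) : PySem.Dict String Int :=
  if i > normal then
    (d.modify "more" 0 (· + 1)).modify "deviation" 0 (· + (i - normal))
  else if i < normal then
    (d.modify "less" 0 (· + 1)).modify "deviation" 0 (· + (i - normal))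
  else d

def get_deviation_dict (masiv : List Int) (normal : Int) : List (String × Int) :=
  (masiv.foldl (pvStepA normal)
    (PySem.Dict.ofList [("less", 0), ("more", 0), ("deviation", 0), ("deviation_2", 0)])).items

-- ===== PORT B =====
-- _bisect_left's while-loop as the structural recursion on hi - lo; the index
-- mid is always in range (lo < hi ≤ len s), so getD is Python's s[mid] exactly.
def pvBisectL (s : List Int) (x : Int) (lo hi : Nat) : Nat :=
  if lo < hi then
    let mid := (lo + hi) / 2
    if s.getD mid 0 < x then pvBisectL s x (mid + 1) hi else pvBisectL s x lo mid
  else lo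
termination_by hi - lo
decreasing_by all_goals omega

def pvBisectR (s : List Int) (x : Int) (lo hi : Nat) : Nat :=
  if lo < hi then
    let mid := (lo + hi) / 2
    if s.getD mid 0 ≤ x then pvBisectR s x (mid + 1) hi else pvBisectR s x lo mid
  else lo
termination_by hi - lo
decreasing_by all_goals omega

def get_deviation_dict_alt (masiv : List Int) (normal : Int) : List (String × Int) :=
  let s := PySem.List.sorted masiv (fun x => x)
  let n := s.length
  let left := pvBisectL s normal 0 n
  let right := pvBisectR s normal 0 n
  [("less", (left : Int)), ("more", (n : Int) - (right : Int)),
   ("deviation", masiv.sum - (n : Int) * normal), ("deviation_2", 0)]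

-- ===== PRECONDITION & SPEC =====
def Spec_get_deviation_dict (masiv : List Int) (normal : Int) (out : List (String × Int)) : Prop := out = get_deviation_dict_alt masiv normal
instance (masiv : List Int) (normal : Int) (out : List (String × Int)) : Decidable (Spec_get_deviation_dict masiv normal out) := by unfold Spec_get_deviation_dict; infer_instance

-- ===== CLAIM (what is proved, stated in full; the proofs are below) =====
def Claim_equal_get_deviation_dict : Prop := ∀ (masiv : List Int) (normal : Int), Dom_get_deviation_dict masiv normal → Spec_get_deviation_dict masiv normal (get_deviation_dict masiv normal)

-- ===== LEMMAS AND PROOFS =====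
-- A's loop characterised: the dict after the fold.
lemma pvLoopA_char (masiv : List Int) (normal a b c e : Int) :
    masiv.foldl (pvStepA normal)
      (PySem.Dict.mk [("less", a), ("more", b), ("deviation", c), ("deviation_2", e)]) =
    PySem.Dict.mk
      [("less", a + ((masiv.filter (fun i => i < normal)).length : Int)),
       ("more", b + ((masiv.filter (fun i => i > normal)).length : Int)),
       ("deviation", c + (masiv.map (fun i => i - normal)).sum),
       ("deviation_2", e)] := by
  induction masiv generalizing a b c with
  | nil => simp
  | cons i t ih =>
    simp only [List.foldl_cons]
    rcases lt_trichotomy i normal with h | h | h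
    · have hstep : pvStepA normal
          (PySem.Dict.mk [("less", a), ("more", b), ("deviation", c), ("deviation_2", e)]) i =
          PySem.Dict.mk [("less", a + 1), ("more", b), ("deviation", c + (i - normal)), ("deviation_2", e)] := by
        simp [pvStepA, not_lt.mpr h.le, h, PySem.Dict.modify, PySem.Dict.insert,
          PySem.Dict.getD, PySem.Dict.get?]
      rw [hstep, ih]
      simp [h, not_lt.mpr h.le]
      constructor
      · omega
      · ring
    · subst h
      have hstep : pvStepA i
          (PySem.Dict.mk [("less", a), ("more", b), ("deviation", c), ("deviation_2", e)]) i =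
          PySem.Dict.mk [("less", a), ("more", b), ("deviation", c), ("deviation_2", e)] := by
        simp [pvStepA]
      rw [hstep, ih]
      simp
    · have hstep : pvStepA normal
          (PySem.Dict.mk [("less", a), ("more", b), ("deviation", c), ("deviation_2", e)]) i =
          PySem.Dict.mk [("less", a), ("more", b + 1), ("deviation", c + (i - normal)), ("deviation_2", e)] := by
        simp [pvStepA, h, PySem.Dict.modify, PySem.Dict.insert, PySem.Dict.getD, PySem.Dict.get?]
      rw [hstep, ih]
      simp [h, not_lt.mpr h.le]
      constructor
      · omega
      · ring

-- If the first k elements satisfy p and the rest do not, countP p = k.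
lemma countP_eq_of_split (s : List Int) (p : Int → Bool) (k : Nat) (hk : k ≤ s.length)
    (h1 : ∀ i (h : i < s.length), i < k → p s[i])
    (h2 : ∀ i (h : i < s.length), k ≤ i → ¬ p s[i]) :
    s.countP p = k := by
  induction s generalizing k with
  | nil =>
    simp only [List.length_nil, Nat.le_zero] at hk
    simp [hk]
  | cons a t ih =>
    cases k with
    | zero =>
      have ha : ¬ p a := h2 0 (by simp) (Nat.zero_le _)
      have ht : t.countP p = 0 := List.countP_eq_zero.mpr (by
        intro x hx
        obtain ⟨i, hi, rfl⟩ := List.getElem_of_mem hx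
        exact h2 (i + 1) (by simpa using Nat.succ_lt_succ hi) (Nat.zero_le _))
      simp [ha, ht]
    | succ m =>
      have ha : p a = true := h1 0 (by simp) (Nat.succ_pos m)
      have := ih m (by simpa using hk)
        (fun i hi him => h1 (i + 1) (by simpa using Nat.succ_lt_succ hi) (Nat.succ_lt_succ him))
        (fun i hi him => h2 (i + 1) (by simpa using Nat.succ_lt_succ hi) (Nat.succ_le_succ him))
      simp [ha, this]

-- pvBisectL on a sorted list with correct invariants computes countP (· < x).
lemma pvBisectL_eq (s : List Int) (x : Int) (lo hi : Nat)
    (hsort : s.Pairwise (fun a b => a ≤ b))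
    (hhi : hi ≤ s.length) (hlh : lo ≤ hi)
    (h1 : ∀ i (h : i < s.length), i < lo → s[i] < x)
    (h2 : ∀ i (h : i < s.length), hi ≤ i → x ≤ s[i]) :
    pvBisectL s x lo hi = s.countP (fun i => decide (i < x)) := by
  have hmono : ∀ i j (hj : j < s.length) (hij : i ≤ j), s[i]'(by omega) ≤ s[j] := by
    intro i j hj hij
    rcases Nat.lt_or_ge i j with h | h
    · exact (List.pairwise_iff_getElem.mp hsort) i j (by omega) hj h
    · have : i = j := by omega
      subst this; exact le_refl _
  by_cases hc : lo < hi
  · rw [pvBisectL]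
    simp only [hc, if_true]
    set mid := (lo + hi) / 2 with hmid
    have hmlt : mid < s.length := by omega
    have hget : s.getD mid 0 = s[mid] := List.getD_eq_getElem s 0 hmlt
    by_cases hv : s.getD mid 0 < x
    · simp only [hv, if_true]
      exact pvBisectL_eq s x (mid + 1) hi hsort hhi (by omega)
        (fun i hi' him => lt_of_le_of_lt (hmono i mid hmlt (by omega)) (hget ▸ hv)) h2
    · simp only [hv, if_false]
      exact pvBisectL_eq s x lo mid hsort (by omega) (by omega) h1
        (fun i hi' him => le_trans (not_lt.mp (hget ▸ hv)) (hmono mid i hi' him))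
  · have : lo = hi := by omega
    subst this
    rw [pvBisectL]
    simp only [hc, if_false]
    exact (countP_eq_of_split s _ lo (by omega)
      (fun i h hi' => by simpa using h1 i h hi')
      (fun i h hi' => by simpa using h2 i h hi')).symm
termination_by hi - lo
decreasing_by all_goals omega

-- pvBisectR on a sorted list with correct invariants computes countP (· ≤ x).
lemma pvBisectR_eq (s : List Int) (x : Int) (lo hi : Nat)
    (hsort : s.Pairwise (fun a b => a ≤ b))
    (hhi : hi ≤ s.length) (hlh : lo ≤ hi)
    (h1 : ∀ i (h : i < s.length), i < lo → s[i] ≤ x)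
    (h2 : ∀ i (h : i < s.length), hi ≤ i → x < s[i]) :
    pvBisectR s x lo hi = s.countP (fun i => decide (i ≤ x)) := by
  have hmono : ∀ i j (hj : j < s.length) (hij : i ≤ j), s[i]'(by omega) ≤ s[j] := by
    intro i j hj hij
    rcases Nat.lt_or_ge i j with h | h
    · exact (List.pairwise_iff_getElem.mp hsort) i j (by omega) hj h
    · have : i = j := by omega
      subst this; exact le_refl _
  by_cases hc : lo < hi
  · rw [pvBisectR]
    simp only [hc, if_true]
    set mid := (lo + hi) / 2 with hmid
    have hmlt : mid < s.length := by omega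
    have hget : s.getD mid 0 = s[mid] := List.getD_eq_getElem s 0 hmlt
    by_cases hv : s.getD mid 0 ≤ x
    · simp only [hv, if_true]
      exact pvBisectR_eq s x (mid + 1) hi hsort hhi (by omega)
        (fun i hi' him => le_trans (hmono i mid hmlt (by omega)) (hget ▸ hv)) h2
    · simp only [hv, if_false]
      exact pvBisectR_eq s x lo mid hsort (by omega) (by omega) h1
        (fun i hi' him => lt_of_lt_of_le (not_le.mp (hget ▸ hv)) (hmono mid i hi' him))
  · have : lo = hi := by omega
    subst this
    rw [pvBisectR]
    simp only [hc, if_false]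
    exact (countP_eq_of_split s _ lo (by omega)
      (fun i h hi' => by simpa using h1 i h hi')
      (fun i h hi' => by simpa using h2 i h hi')).symm
termination_by hi - lo
decreasing_by all_goals omega

lemma countP_le_add_gt (l : List Int) (x : Int) :
    l.countP (fun i => decide (i ≤ x)) + l.countP (fun i => decide (x < i)) = l.length := by
  induction l with
  | nil => simp
  | cons a t ih =>
    by_cases h : a ≤ x
    · have h2 : ¬ x < a := not_lt.mpr h
      simp [h, h2]; omega
    · have h2 : x < a := not_le.mp h
      simp [h, h2]; omega

lemma sum_map_sub (masiv : List Int) (normal : Int) :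
    (masiv.map (fun i => i - normal)).sum = masiv.sum - (masiv.length : Int) * normal := by
  induction masiv with
  | nil => simp
  | cons a t ih => simp [ih]; ring

-- ===== VERDICT (by name: the statement is the Claim_ definition above) =====
theorem get_deviation_dict_spec : Claim_equal_get_deviation_dict := by
  intro masiv normal _
  unfold Spec_get_deviation_dict get_deviation_dict get_deviation_dict_alt
  rw [show (PySem.Dict.ofList [("less", (0:Int)), ("more", 0), ("deviation", 0), ("deviation_2", 0)]) =
      PySem.Dict.mk [("less", 0), ("more", 0), ("deviation", 0), ("deviation_2", 0)] from by decide,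
    pvLoopA_char]
  have hperm : (PySem.List.sorted masiv (fun x => x)).Perm masiv := PySem.List.sorted_perm masiv (fun x => x) false
  have hsort : (PySem.List.sorted masiv (fun x => x)).Pairwise (fun a b => a ≤ b) :=
    PySem.List.sorted_pairwise masiv (fun x => x)
  set s := PySem.List.sorted masiv (fun x => x) with hs
  have hlen : s.length = masiv.length := hperm.length_eq
  have hL : pvBisectL s normal 0 s.length = s.countP (fun i => decide (i < normal)) :=
    pvBisectL_eq s normal 0 s.length hsort (le_refl _) (Nat.zero_le _)
      (fun i h hi => absurd hi (Nat.not_lt_zero i)) (fun i h hi => absurd h (by omega))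
  have hR : pvBisectR s normal 0 s.length = s.countP (fun i => decide (i ≤ normal)) :=
    pvBisectR_eq s normal 0 s.length hsort (le_refl _) (Nat.zero_le _)
      (fun i h hi => absurd hi (Nat.not_lt_zero i)) (fun i h hi => absurd h (by omega))
  have hcl : s.countP (fun i => decide (i < normal)) = masiv.countP (fun i => decide (i < normal)) :=
    hperm.countP_eq _
  have hcr : s.countP (fun i => decide (i ≤ normal)) = masiv.countP (fun i => decide (i ≤ normal)) :=
    hperm.countP_eq _
  have hsplit := countP_le_add_gt masiv normal
  have hBl : ((pvBisectL s normal 0 s.length : Nat) : Int) = ((masiv.filter (fun i => decide (i < normal))).length : Int) := by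
    rw [hL, hcl, List.countP_eq_length_filter]
  have hBr : ((s.length : Nat) : Int) - ((pvBisectR s normal 0 s.length : Nat) : Int) = ((masiv.filter (fun i => decide (i > normal))).length : Int) := by
    rw [hR, hcr, hlen]
    have h1 : masiv.countP (fun i => decide (i ≤ normal)) = (masiv.filter (fun i => decide (i ≤ normal))).length := by
      rw [List.countP_eq_length_filter]
    have h2 : masiv.countP (fun i => decide (normal < i)) = (masiv.filter (fun i => decide (i > normal))).length := by
      rw [List.countP_eq_length_filter]
    omega
  have hBd : masiv.sum - ((s.length : Nat) : Int) * normal = (masiv.map (fun i => i - normal)).sum := by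
    rw [hlen, sum_map_sub]
  simp only [zero_add]
  rw [← hBl, ← hBr, ← hBd]
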